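-- pv_equiv track=rewrite | github.com/pphuangyi/coderalla | CodingPractices/sudoku/sudoku_solver_1.py | necessity_fill
-- ===== SOURCE A (Python) =====
-- def necessity_fill(puzzle, memo):
--
-- 	to_be_removed = set()
-- 	for k, A in memo.items():
-- 		i, j = k // 9, k % 9
-- 		row, column, cell = A.copy(), A.copy(), A.copy()
-- 		for l, B in memo.items():
-- 			if l == k:
-- 				continue
-- 			s, t = l // 9, l % 9
-- 			if s == i:
-- 				row -= memo[l]
-- 			if t == j:
-- 				column -= memo[l]
-- 			if (i // 3) == (s // 3) and (j // 3) == (t // 3):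
-- 				cell -= memo[l]
--
-- 		if len(row) == 1:
-- 			puzzle[k] = list(row)[0]
-- 			to_be_removed.add(k)
-- 		if len(column) == 1:
-- 			puzzle[k] = list(column)[0]
-- 			to_be_removed.add(k)
-- 		if len(cell) == 1:
-- 			puzzle[k] = list(cell)[0]
-- 			to_be_removed.add(k)
--
-- 	for key in to_be_removed:
-- 		del memo[key]
--
-- 	return puzzle, memo
-- ===== SOURCE B (Python) =====
-- def necessity_fill(puzzle, memo):
--     # One pass builds per-row / per-column / per-box occurrence counts of each
--     # candidate value; a value survives the unit subtraction iff its count is 1.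
--     row_cnt, col_cnt, box_cnt = {}, {}, {}
--     for k, A in memo.items():
--         i, j = k // 9, k % 9
--         b = (i // 3, j // 3)
--         for v in A:
--             row_cnt[(i, v)] = row_cnt.get((i, v), 0) + 1
--             col_cnt[(j, v)] = col_cnt.get((j, v), 0) + 1
--             box_cnt[(b, v)] = box_cnt.get((b, v), 0) + 1
--     removed = []
--     for k, A in memo.items():
--         i, j = k // 9, k % 9
--         b = (i // 3, j // 3)
--         row = [v for v in A if row_cnt[(i, v)] == 1]
--         col = [v for v in A if col_cnt[(j, v)] == 1]
--         cell = [v for v in A if box_cnt[(b, v)] == 1]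
--         val = None
--         if len(row) == 1:
--             val = row[0]
--         if len(col) == 1:
--             val = col[0]
--         if len(cell) == 1:
--             val = cell[0]
--         if val is not None:
--             puzzle[k] = val
--             removed.append(k)
--     for k in removed:
--         del memo[k]
--     return puzzle, memo
-- ===== Notes on version B (the rewrite author's own statement) =====
-- stated objective: faster
-- what changed: A subtracts, for every memo cell, the candidate sets of every other cell in its row/column/box (a nested scan over all memo pairs); B makes one counting pass that tallies each candidate value's occurrences per row, column and box in hash maps, so a value survives a unit subtraction iff its unit count is 1 and the inner scan disappears.
import Mathlib
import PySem

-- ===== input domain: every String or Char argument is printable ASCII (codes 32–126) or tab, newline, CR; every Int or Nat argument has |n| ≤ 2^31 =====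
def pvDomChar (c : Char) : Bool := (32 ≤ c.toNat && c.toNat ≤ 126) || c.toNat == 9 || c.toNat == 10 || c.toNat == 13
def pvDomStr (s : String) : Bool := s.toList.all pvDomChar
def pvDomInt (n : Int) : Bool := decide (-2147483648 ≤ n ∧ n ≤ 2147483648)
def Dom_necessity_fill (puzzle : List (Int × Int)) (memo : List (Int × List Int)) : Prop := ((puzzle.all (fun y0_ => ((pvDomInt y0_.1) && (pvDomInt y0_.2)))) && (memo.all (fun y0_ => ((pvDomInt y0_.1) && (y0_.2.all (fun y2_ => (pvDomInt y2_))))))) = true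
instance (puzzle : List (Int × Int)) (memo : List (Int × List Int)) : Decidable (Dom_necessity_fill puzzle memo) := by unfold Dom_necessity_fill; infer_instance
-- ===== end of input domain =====

-- B replaces A's quadratic all-pairs set subtractions by one counting pass per
-- row/column/box (a value survives the unit subtraction iff its occurrence count
-- in the unit is 1); both functions also mutate their dict arguments in Python —
-- the equivalence proved here is about the RETURN value (both return the mutated
-- pair, and B performs the same mutations).

-- Input marshalling shared by both ports: exactly how Python builds the
-- dict-of-sets argument (dict: first position / last value per key; set: first
-- occurrences kept); not part of either algorithm.
def pvMemoDict (memo : List (Int × List Int)) : PySem.Dict Int (List Int) :=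
  PySem.Dict.ofList (memo.map (fun p => (p.1, PySem.Set.ofList p.2)))

-- ===== PORT A =====
-- `list(row)[0]` is ported as `.headD 0`: it is only reached under the
-- `len(row) == 1` guard, where the unique element is order-independent; the
-- `for key in to_be_removed: del memo[key]` loop is a fold over the set's
-- element list (deletions of distinct keys are order-independent).
def necessity_fill (puzzle : List (Int × Int)) (memo : List (Int × List Int)) :
    (List (Int × Int)) × (List (Int × List Int)) :=
  let md := pvMemoDict memo
  let st := md.items.foldl
    (fun (st : PySem.Dict Int Int × PySem.Set Int) kA =>
      let k := kA.1
      let i := PySem.Int.floordiv k 9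
      let j := PySem.Int.mod k 9
      let rcc := md.items.foldl
        (fun (rcc : List Int × List Int × List Int) lB =>
          if lB.1 == k then rcc
          else
            let s := PySem.Int.floordiv lB.1 9
            let t := PySem.Int.mod lB.1 9
            let row := if s == i then PySem.Set.diff rcc.1 (md.getD lB.1 []) else rcc.1
            let column := if t == j then PySem.Set.diff rcc.2.1 (md.getD lB.1 []) else rcc.2.1
            let cell := if (PySem.Int.floordiv i 3 == PySem.Int.floordiv s 3) &&
                           (PySem.Int.floordiv j 3 == PySem.Int.floordiv t 3)
                        then PySem.Set.diff rcc.2.2 (md.getD lB.1 []) else rcc.2.2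
            (row, column, cell))
        (kA.2, kA.2, kA.2)
      let st := if PySem.Set.len rcc.1 == 1 then
          (st.1.insert k (rcc.1.headD 0), PySem.Set.add st.2 k) else st
      let st := if PySem.Set.len rcc.2.1 == 1 then
          (st.1.insert k (rcc.2.1.headD 0), PySem.Set.add st.2 k) else st
      let st := if PySem.Set.len rcc.2.2 == 1 then
          (st.1.insert k (rcc.2.2.headD 0), PySem.Set.add st.2 k) else st
      st)
    (PySem.Dict.ofList puzzle, PySem.Set.empty)
  let md2 := st.2.foldl (fun d key => d.erase key) md
  (st.1.items, md2.items)

-- ===== PORT B =====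
-- `[v for v in A if …]` iterates the set A: only its length and (when a
-- singleton) its unique element are consumed, so folding the set's element
-- list is exact.
def necessity_fill_alt (puzzle : List (Int × Int)) (memo : List (Int × List Int)) :
    (List (Int × Int)) × (List (Int × List Int)) :=
  let md := pvMemoDict memo
  let cnts := md.items.foldl
    (fun (cnts : PySem.Dict (Int × Int) Int × PySem.Dict (Int × Int) Int ×
                 PySem.Dict ((Int × Int) × Int) Int) kA =>
      let i := PySem.Int.floordiv kA.1 9
      let j := PySem.Int.mod kA.1 9
      let b := (PySem.Int.floordiv i 3, PySem.Int.floordiv j 3)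
      kA.2.foldl
        (fun cnts v =>
          (cnts.1.insert (i, v) (cnts.1.getD (i, v) 0 + 1),
           cnts.2.1.insert (j, v) (cnts.2.1.getD (j, v) 0 + 1),
           cnts.2.2.insert (b, v) (cnts.2.2.getD (b, v) 0 + 1)))
        cnts)
    (PySem.Dict.empty, PySem.Dict.empty, PySem.Dict.empty)
  let st := md.items.foldl
    (fun (st : PySem.Dict Int Int × List Int) kA =>
      let k := kA.1
      let i := PySem.Int.floordiv k 9
      let j := PySem.Int.mod k 9
      let b := (PySem.Int.floordiv i 3, PySem.Int.floordiv j 3)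
      let row := kA.2.filter (fun v => cnts.1.getD (i, v) 0 == 1)
      let col := kA.2.filter (fun v => cnts.2.1.getD (j, v) 0 == 1)
      let cell := kA.2.filter (fun v => cnts.2.2.getD (b, v) 0 == 1)
      let val : Option Int := none
      let val := if row.length == 1 then some (row.headD 0) else val
      let val := if col.length == 1 then some (col.headD 0) else val
      let val := if cell.length == 1 then some (cell.headD 0) else val
      match val with
      | some v => (st.1.insert k v, st.2 ++ [k])
      | none => st)
    (PySem.Dict.ofList puzzle, [])
  let md2 := st.2.foldl (fun d key => d.erase key) md
  (st.1.items, md2.items)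

-- ===== PRECONDITION & SPEC =====
def Spec_necessity_fill (puzzle : List (Int × Int)) (memo : List (Int × List Int)) (out : (List (Int × Int)) × (List (Int × List Int))) : Prop := out = necessity_fill_alt puzzle memo
instance (puzzle : List (Int × Int)) (memo : List (Int × List Int)) (out : (List (Int × Int)) × (List (Int × List Int))) : Decidable (Spec_necessity_fill puzzle memo out) := by unfold Spec_necessity_fill; infer_instance

-- ===== CLAIM (what is proved, stated in full; the proofs are below) =====
def Claim_equal_necessity_fill : Prop := ∀ (puzzle : List (Int × Int)) (memo : List (Int × List Int)), Dom_necessity_fill puzzle memo → Spec_necessity_fill puzzle memo (necessity_fill puzzle memo)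

-- ===== LEMMAS AND PROOFS =====

-- the three unit keys of a board position k
def uR (l : Int) : Int := PySem.Int.floordiv l 9
def uC (l : Int) : Int := PySem.Int.mod l 9
def uB (l : Int) : Int × Int :=
  (PySem.Int.floordiv (PySem.Int.floordiv l 9) 3, PySem.Int.floordiv (PySem.Int.mod l 9) 3)

-- all (unit-key, candidate) occurrences of a memo item list
def flatU {κ : Type} (u : Int → κ) (L : List (Int × List Int)) : List (κ × Int) :=
  L.flatMap (fun p => p.2.map (fun v => (u p.1, v)))

-- the occurrence-count dict B builds for one unit kind
def cntD {κ : Type} [BEq κ] (u : Int → κ) (L : List (Int × List Int)) :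
    PySem.Dict (κ × Int) Int :=
  (flatU u L).foldl (fun d x => d.insert x (d.getD x 0 + 1)) PySem.Dict.empty

-- a triple-valued componentwise foldl is the triple of the component foldls
lemma foldl_prod3 {α β γ δ : Type*} (f : α → δ → α) (g : β → δ → β) (h : γ → δ → γ)
    (L : List δ) (a : α) (b : β) (c : γ) :
    L.foldl (fun t x => (f t.1 x, g t.2.1 x, h t.2.2 x)) (a, b, c) =
      (L.foldl f a, L.foldl g b, L.foldl h c) := by
  induction L generalizing a b c with
  | nil => rfl
  | cons p L ih => simpa using ih (f a p) (g b p) (h c p)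

lemma getD_cntD {κ : Type} [BEq κ] [LawfulBEq κ] (u : Int → κ) (L : List (Int × List Int))
    (key : κ × Int) : (cntD u L).getD key 0 = ((flatU u L).count key : Int) := by
  unfold cntD
  rw [PySem.Dict.getD_foldl_insert_add_one]
  simp [PySem.Dict.getD_empty]

-- count of (u k, v) in one run of items none of whose keys is k
lemma count_flat_eq_zero_iff {κ : Type} [BEq κ] [LawfulBEq κ] (u : Int → κ)
    (M : List (Int × List Int)) (k : Int) (v : Int) :
    (flatU u M).count (u k, v) = 0 ↔ ∀ p ∈ M, u p.1 = u k → v ∉ p.2 := by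
  rw [List.count_eq_zero]
  simp only [flatU, List.mem_flatMap, List.mem_map, Prod.mk.injEq]
  constructor
  · intro h p hp hu hv
    exact h ⟨p, hp, v, hv, by simp [hu]⟩
  · rintro h ⟨p, hp, w, hw, hu, rfl⟩
    exact h p hp hu hw

-- hidden single: the count of (u k, v) over all items is 1 iff no OTHER item in
-- the same unit contains v
lemma count_flat_eq_one_iff {κ : Type} [BEq κ] [LawfulBEq κ] (u : Int → κ)
    (L : List (Int × List Int)) (hK : (L.map Prod.fst).Nodup)
    (k : Int) (A : List Int) (hm : (k, A) ∈ L) (hA : A.Nodup) (v : Int) (hv : v ∈ A) :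
    ((flatU u L).count (u k, v) = 1 ↔
      ∀ p ∈ L, p.1 ≠ k → u p.1 = u k → v ∉ p.2) := by
  obtain ⟨L₁, L₂, rfl⟩ := List.append_of_mem hm
  have hK' := hK
  simp only [List.map_append, List.map_cons, List.nodup_append, List.nodup_cons] at hK'
  have hk1 : k ∉ L₁.map Prod.fst := fun h => hK'.2.2 k h k (by simp) rfl
  have hk2 : k ∉ L₂.map Prod.fst := hK'.2.1.1
  have hA1 : ((A.map (fun w => (u k, w))).count (u k, v)) = 1 := by
    rw [List.count_map_of_injective _ _ (fun a b h => congrArg Prod.snd h)]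
    exact List.count_eq_one_of_mem hA hv
  have hsplit : (flatU u (L₁ ++ (k, A) :: L₂)).count (u k, v) =
      (flatU u L₁).count (u k, v) + 1 + (flatU u L₂).count (u k, v) := by
    simp only [flatU, List.flatMap_append, List.flatMap_cons, List.count_append, hA1]
    ring
  rw [hsplit]
  constructor
  · intro h p hp hne hu
    have h1 : (flatU u L₁).count (u k, v) = 0 := by omega
    have h2 : (flatU u L₂).count (u k, v) = 0 := by omega
    rw [count_flat_eq_zero_iff] at h1 h2
    rcases List.mem_append.mp hp with hp1 | hp2
    · exact h1 p hp1 hu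
    · rcases List.mem_cons.mp hp2 with rfl | hp2
      · exact absurd rfl hne
      · exact h2 p hp2 hu
  · intro h
    have h1 : (flatU u L₁).count (u k, v) = 0 := by
      rw [count_flat_eq_zero_iff]
      intro p hp hu
      exact h p (List.mem_append_left _ hp)
        (fun he => hk1 (he ▸ List.mem_map_of_mem hp)) hu
    have h2 : (flatU u L₂).count (u k, v) = 0 := by
      rw [count_flat_eq_zero_iff]
      intro p hp hu
      exact h p (List.mem_append_right _ (List.mem_cons_of_mem _ hp))
        (fun he => hk2 (he ▸ List.mem_map_of_mem hp)) hu
    omega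

-- A's chain of conditional set subtractions is a filter
lemma foldl_diff_filter (c : Int × List Int → Bool) :
    ∀ (L : List (Int × List Int)) (A : List Int),
    L.foldl (fun r p => if c p then PySem.Set.diff r p.2 else r) A =
      A.filter (fun v => L.all (fun p => !c p || !(p.2.contains v))) := by
  intro L
  induction L with
  | nil => intro A; simp
  | cons p L ih =>
    intro A
    rw [List.foldl_cons]
    by_cases hc : c p
    · rw [if_pos hc, ih]
      simp only [PySem.Set.diff, List.filter_filter]
      apply List.filter_congr
      intro v _
      simp [hc, Bool.and_comm]
    · rw [if_neg hc, ih]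
      apply List.filter_congr
      intro v _
      simp [hc]

-- the filtered candidate list B computes for one unit kind
def rowF {κ : Type} [BEq κ] (u : Int → κ) (L : List (Int × List Int))
    (p : Int × List Int) : List Int :=
  p.2.filter (fun v => (cntD u L).getD (u p.1, v) 0 == 1)

-- values of the marshalled memo dict are duplicate-free
lemma nodup_values_foldl (L : List (Int × List Int)) :
    ∀ d : PySem.Dict Int (List Int), (∀ p ∈ d.items, p.2.Nodup) →
    (∀ p ∈ L, p.2.Nodup) →
    ∀ p ∈ (L.foldl (fun acc q => acc.insert q.1 q.2) d).items, p.2.Nodup := by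
  induction L with
  | nil => intro d hd _ p hp; exact hd p hp
  | cons q L ih =>
    intro d hd hL p hp
    refine ih (d.insert q.1 q.2) ?_ (fun r hr => hL r (List.mem_cons_of_mem _ hr)) p hp
    intro r hr
    rcases (PySem.Dict.mem_items_insert d q.1 q.2 r).mp hr with rfl | ⟨hr, _⟩
    · exact hL q (by simp)
    · exact hd r hr

lemma nodup_values_memo (memo : List (Int × List Int)) :
    ∀ p ∈ (pvMemoDict memo).items, p.2.Nodup := by
  intro p hp
  refine nodup_values_foldl _ PySem.Dict.empty (by simp [PySem.Dict.empty]) ?_ p hp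
  intro q hq
  simp only [List.mem_map] at hq
  obtain ⟨r, _, rfl⟩ := hq
  exact PySem.Set.nodup_ofList _

-- A's inner subtraction loop over one unit equals B's count-filter
lemma inner_unit_eq {κ : Type} [BEq κ] [LawfulBEq κ] (u : Int → κ)
    (md : PySem.Dict Int (List Int)) (hnd : md.keys.Nodup)
    (hV : ∀ p ∈ md.items, p.2.Nodup)
    (k : Int) (A : List Int) (hm : (k, A) ∈ md.items)
    (cond : Int × List Int → Bool) (hc : ∀ q, cond q = (u q.1 == u k)) :
    md.items.foldl
      (fun r q => if q.1 == k then r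
        else if cond q then PySem.Set.diff r (md.getD q.1 []) else r) A
      = rowF u md.items (k, A) := by
  have hG : ∀ q ∈ md.items, md.getD q.1 [] = q.2 := by
    intro q hq
    exact PySem.Dict.getD_of_mem_items md (k := q.1) (v := q.2) hq hnd []
  rw [show md.items.foldl
      (fun r q => if q.1 == k then r
        else if cond q then PySem.Set.diff r (md.getD q.1 []) else r) A
      = md.items.foldl
      (fun r q => if (!(q.1 == k) && cond q) then PySem.Set.diff r q.2 else r) A from
    List.foldl_ext _ _ _ (by
      intro r q hq
      by_cases h1 : q.1 = k <;> by_cases h2 : cond q <;>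
        simp [h1, h2, hG q hq])]
  rw [foldl_diff_filter]
  apply List.filter_congr
  intro v hv
  rw [getD_cntD]
  have hK : (md.items.map Prod.fst).Nodup := by
    simpa [PySem.Dict.keys] using hnd
  have hiff := count_flat_eq_one_iff u md.items hK k A hm (hV _ hm) v hv
  rw [Bool.eq_iff_iff]
  simp only [List.all_eq_true, Bool.or_eq_true, Bool.not_eq_true',
    beq_iff_eq, hc]
  constructor
  · intro hall
    have : ∀ p ∈ md.items, p.1 ≠ k → u p.1 = u k → v ∉ p.2 := by
      intro p hp hne hu
      rcases hall p hp with h | h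
      · rw [Bool.and_eq_false_iff] at h
        rcases h with h' | h'
        · exact absurd (by simpa using h') hne
        · exact absurd hu (by simpa using h')
      · simpa using h
    have := hiff.mpr this
    simp [this]
  · intro hcnt p hp
    have h1 : (flatU u md.items).count (u k, v) = 1 := by
      simpa [Nat.cast_eq_one] using hcnt
    have hmain := hiff.mp h1 p hp
    by_cases hne : p.1 = k
    · left; simp [hne]
    · by_cases hu : u p.1 = u k
      · right; simpa using hmain hne hu
      · left; simp [hu]

-- B's one-pass counting loop builds exactly the three occurrence-count dicts
lemma foldl_cnt {κ : Type} [BEq κ] [LawfulBEq κ] (u : Int → κ)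
    (L : List (Int × List Int)) (d : PySem.Dict (κ × Int) Int) :
    L.foldl (fun d kA => kA.2.foldl
        (fun d v => d.insert (u kA.1, v) (d.getD (u kA.1, v) 0 + 1)) d) d
      = (flatU u L).foldl (fun d x => d.insert x (d.getD x 0 + 1)) d := by
  rw [flatU, List.foldl_flatMap]
  apply List.foldl_ext
  intro d kA _
  rw [List.foldl_map]

lemma len_beq_one (xs : List Int) :
    (PySem.Set.len xs == (1 : Int)) = (xs.length == 1) := by
  simp [PySem.Set.len]

-- proof-side names for the two second-pass step functions
def stepA (R C Bx : Int × List Int → List Int)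
    (st : PySem.Dict Int Int × PySem.Set Int) (p : Int × List Int) :
    PySem.Dict Int Int × PySem.Set Int :=
  let st := if PySem.Set.len (R p) == 1 then
      (st.1.insert p.1 ((R p).headD 0), PySem.Set.add st.2 p.1) else st
  let st := if PySem.Set.len (C p) == 1 then
      (st.1.insert p.1 ((C p).headD 0), PySem.Set.add st.2 p.1) else st
  if PySem.Set.len (Bx p) == 1 then
      (st.1.insert p.1 ((Bx p).headD 0), PySem.Set.add st.2 p.1) else st

def stepB (R C Bx : Int × List Int → List Int)
    (st : PySem.Dict Int Int × List Int) (p : Int × List Int) :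
    PySem.Dict Int Int × List Int :=
  match (let val : Option Int := none
         let val := if (R p).length == 1 then some ((R p).headD 0) else val
         let val := if (C p).length == 1 then some ((C p).headD 0) else val
         if (Bx p).length == 1 then some ((Bx p).headD 0) else val) with
  | some v => (st.1.insert p.1 v, st.2 ++ [p.1])
  | none => st

-- one outer-loop step of A equals one outer-loop step of B, given the same
-- row/column/cell lists and a key not yet marked for removal
lemma step_eq (R C Bx : Int × List Int → List Int) (pz : PySem.Dict Int Int)
    (tbr : List Int) (p : Int × List Int) (hk : p.1 ∉ tbr) :
    stepA R C Bx (pz, tbr) p = stepB R C Bx (pz, tbr) p := by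
  have hadd : PySem.Set.add tbr p.1 = tbr ++ [p.1] := PySem.Set.add_of_not_mem hk
  have hadd2 : PySem.Set.add (tbr ++ [p.1]) p.1 = tbr ++ [p.1] :=
    PySem.Set.add_of_mem (by simp)
  unfold stepA stepB
  simp only [len_beq_one]
  by_cases h1 : (R p).length = 1 <;> by_cases h2 : (C p).length = 1 <;>
    by_cases h3 : (Bx p).length = 1 <;>
    simp [h1, h2, h3, hadd, PySem.Dict.insert_insert_self]

lemma stepB_snd (R C Bx : Int × List Int → List Int)
    (st : PySem.Dict Int Int × List Int) (p : Int × List Int) :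
    (stepB R C Bx st p).2 = st.2 ∨ (stepB R C Bx st p).2 = st.2 ++ [p.1] := by
  unfold stepB
  rcases h : (let val : Option Int := none
      let val := if (R p).length == 1 then some ((R p).headD 0) else val
      let val := if (C p).length == 1 then some ((C p).headD 0) else val
      if (Bx p).length == 1 then some ((Bx p).headD 0) else val) with _ | v <;>
    simp

-- the two second-pass folds agree, item by item
lemma fold_steps (R C Bx : Int × List Int → List Int) :
    ∀ (L : List (Int × List Int)) (pz : PySem.Dict Int Int) (tbr : List Int),
    (L.map Prod.fst).Nodup → (∀ x ∈ tbr, x ∉ L.map Prod.fst) →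
    L.foldl (stepA R C Bx) (pz, tbr) = L.foldl (stepB R C Bx) (pz, tbr) := by
  intro L
  induction L with
  | nil => intros; rfl
  | cons p L ih =>
    intro pz tbr hnd htbr
    have hk : p.1 ∉ tbr := fun h => htbr p.1 h (by simp)
    have hnd' : (L.map Prod.fst).Nodup := (List.nodup_cons.mp (by simpa using hnd)).2
    have hp1 : p.1 ∉ L.map Prod.fst := (List.nodup_cons.mp (by simpa using hnd)).1
    rw [List.foldl_cons, List.foldl_cons, step_eq R C Bx pz tbr p hk]
    have := ih (stepB R C Bx (pz, tbr) p).1 (stepB R C Bx (pz, tbr) p).2 hnd' ?_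
    · exact this
    · intro x hx hm
      rcases stepB_snd R C Bx (pz, tbr) p with h | h
      · rw [h] at hx
        exact htbr x hx (List.mem_cons_of_mem _ hm)
      · rw [h] at hx
        rcases List.mem_append.mp hx with hx | hx
        · exact htbr x hx (List.mem_cons_of_mem _ hm)
        · simp only [List.mem_singleton] at hx
          exact hp1 (hx ▸ hm)

lemma cnts_eq (L : List (Int × List Int)) :
    L.foldl (fun cnts kA =>
      kA.2.foldl
        (fun (cnts : PySem.Dict (Int × Int) Int × PySem.Dict (Int × Int) Int ×
                     PySem.Dict ((Int × Int) × Int) Int) v =>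
          (cnts.1.insert (PySem.Int.floordiv kA.1 9, v)
             (cnts.1.getD (PySem.Int.floordiv kA.1 9, v) 0 + 1),
           cnts.2.1.insert (PySem.Int.mod kA.1 9, v)
             (cnts.2.1.getD (PySem.Int.mod kA.1 9, v) 0 + 1),
           cnts.2.2.insert
             ((PySem.Int.floordiv (PySem.Int.floordiv kA.1 9) 3,
               PySem.Int.floordiv (PySem.Int.mod kA.1 9) 3), v)
             (cnts.2.2.getD
               ((PySem.Int.floordiv (PySem.Int.floordiv kA.1 9) 3,
                 PySem.Int.floordiv (PySem.Int.mod kA.1 9) 3), v) 0 + 1)))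
        cnts)
      (PySem.Dict.empty, PySem.Dict.empty, PySem.Dict.empty)
    = (cntD uR L, cntD uC L, cntD uB L) := by
  refine (List.foldl_ext _ (fun (cnts : PySem.Dict (Int × Int) Int × PySem.Dict (Int × Int) Int ×
                     PySem.Dict ((Int × Int) × Int) Int) (kA : Int × List Int) =>
      (kA.2.foldl (fun d v => d.insert (uR kA.1, v) (d.getD (uR kA.1, v) 0 + 1)) cnts.1,
       kA.2.foldl (fun d v => d.insert (uC kA.1, v) (d.getD (uC kA.1, v) 0 + 1)) cnts.2.1,
       kA.2.foldl (fun d v => d.insert (uB kA.1, v) (d.getD (uB kA.1, v) 0 + 1)) cnts.2.2))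
      _ ?_).trans
    ((foldl_prod3
      (fun (d : PySem.Dict (Int × Int) Int) (kA : Int × List Int) =>
        kA.2.foldl (fun d v => d.insert (uR kA.1, v) (d.getD (uR kA.1, v) 0 + 1)) d)
      (fun (d : PySem.Dict (Int × Int) Int) (kA : Int × List Int) =>
        kA.2.foldl (fun d v => d.insert (uC kA.1, v) (d.getD (uC kA.1, v) 0 + 1)) d)
      (fun (d : PySem.Dict ((Int × Int) × Int) Int) (kA : Int × List Int) =>
        kA.2.foldl (fun d v => d.insert (uB kA.1, v) (d.getD (uB kA.1, v) 0 + 1)) d)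
      L PySem.Dict.empty PySem.Dict.empty PySem.Dict.empty).trans
      (congrArg₂ Prod.mk (foldl_cnt uR L PySem.Dict.empty)
        (congrArg₂ Prod.mk (foldl_cnt uC L PySem.Dict.empty) (foldl_cnt uB L PySem.Dict.empty))))
  intro cnts kA _
  obtain ⟨a, b, c⟩ := cnts
  exact foldl_prod3
    (fun (d : PySem.Dict (Int × Int) Int) v => d.insert (uR kA.1, v) (d.getD (uR kA.1, v) 0 + 1))
    (fun (d : PySem.Dict (Int × Int) Int) v => d.insert (uC kA.1, v) (d.getD (uC kA.1, v) 0 + 1))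
    (fun (d : PySem.Dict ((Int × Int) × Int) Int) v => d.insert (uB kA.1, v) (d.getD (uB kA.1, v) 0 + 1))
    kA.2 a b c

lemma box_cond (k q : Int) :
    ((PySem.Int.floordiv (PySem.Int.floordiv k 9) 3 ==
        PySem.Int.floordiv (PySem.Int.floordiv q 9) 3) &&
     (PySem.Int.floordiv (PySem.Int.mod k 9) 3 ==
        PySem.Int.floordiv (PySem.Int.mod q 9) 3))
    = (uB q == uB k) := by
  rw [Bool.eq_iff_iff]
  simp only [Bool.and_eq_true, beq_iff_eq, uB, Prod.mk.injEq]
  constructor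
  · rintro ⟨h1, h2⟩; exact ⟨h1.symm, h2.symm⟩
  · rintro ⟨h1, h2⟩; exact ⟨h1.symm, h2.symm⟩

-- the three instances of inner_unit_eq with A's literal conditions
lemma inner_row (md : PySem.Dict Int (List Int)) (hnd : md.keys.Nodup)
    (hV : ∀ p ∈ md.items, p.2.Nodup) (k : Int) (A : List Int) (hm : (k, A) ∈ md.items) :
    md.items.foldl (fun r q => if q.1 == k then r
      else if PySem.Int.floordiv q.1 9 == PySem.Int.floordiv k 9 then
        PySem.Set.diff r (md.getD q.1 []) else r) A = rowF uR md.items (k, A) :=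
  inner_unit_eq uR md hnd hV k A hm _ (fun _ => rfl)

lemma inner_col (md : PySem.Dict Int (List Int)) (hnd : md.keys.Nodup)
    (hV : ∀ p ∈ md.items, p.2.Nodup) (k : Int) (A : List Int) (hm : (k, A) ∈ md.items) :
    md.items.foldl (fun r q => if q.1 == k then r
      else if PySem.Int.mod q.1 9 == PySem.Int.mod k 9 then
        PySem.Set.diff r (md.getD q.1 []) else r) A = rowF uC md.items (k, A) :=
  inner_unit_eq uC md hnd hV k A hm _ (fun _ => rfl)

lemma inner_box (md : PySem.Dict Int (List Int)) (hnd : md.keys.Nodup)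
    (hV : ∀ p ∈ md.items, p.2.Nodup) (k : Int) (A : List Int) (hm : (k, A) ∈ md.items) :
    md.items.foldl (fun r q => if q.1 == k then r
      else if (PySem.Int.floordiv (PySem.Int.floordiv k 9) 3 ==
                 PySem.Int.floordiv (PySem.Int.floordiv q.1 9) 3) &&
              (PySem.Int.floordiv (PySem.Int.mod k 9) 3 ==
                 PySem.Int.floordiv (PySem.Int.mod q.1 9) 3) then
        PySem.Set.diff r (md.getD q.1 []) else r) A = rowF uB md.items (k, A) :=
  inner_unit_eq uB md hnd hV k A hm _ (fun q => box_cond k q.1)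

-- ===== VERDICT (by name: the statement is the Claim_ definition above) =====
theorem necessity_fill_spec : Claim_equal_necessity_fill := by
  intro puzzle memo _
  show necessity_fill puzzle memo = necessity_fill_alt puzzle memo
  have hnd : (pvMemoDict memo).keys.Nodup := PySem.Dict.nodup_keys_ofList _
  have hK : ((pvMemoDict memo).items.map Prod.fst).Nodup := by
    simpa [PySem.Dict.keys] using hnd
  have hV := nodup_values_memo memo
  unfold necessity_fill necessity_fill_alt
  simp only [cnts_eq]
  rw [List.foldl_ext _
      (stepA (rowF uR (pvMemoDict memo).items) (rowF uC (pvMemoDict memo).items)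
             (rowF uB (pvMemoDict memo).items)) _ ?hA]
  case hA =>
    intro st p hp
    rw [List.foldl_ext _ (fun rcc lB =>
        ((fun r (q : Int × List Int) => if q.1 == p.1 then r
            else if PySem.Int.floordiv q.1 9 == PySem.Int.floordiv p.1 9 then
              PySem.Set.diff r ((pvMemoDict memo).getD q.1 []) else r) rcc.1 lB,
         (fun r (q : Int × List Int) => if q.1 == p.1 then r
            else if PySem.Int.mod q.1 9 == PySem.Int.mod p.1 9 then
              PySem.Set.diff r ((pvMemoDict memo).getD q.1 []) else r) rcc.2.1 lB,
         (fun r (q : Int × List Int) => if q.1 == p.1 then r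
            else if (PySem.Int.floordiv (PySem.Int.floordiv p.1 9) 3 ==
                       PySem.Int.floordiv (PySem.Int.floordiv q.1 9) 3) &&
                    (PySem.Int.floordiv (PySem.Int.mod p.1 9) 3 ==
                       PySem.Int.floordiv (PySem.Int.mod q.1 9) 3) then
              PySem.Set.diff r ((pvMemoDict memo).getD q.1 []) else r) rcc.2.2 lB))
      _ (by
        intro rcc lB _
        by_cases h : lB.1 = p.1 <;> simp [h])]
    rw [foldl_prod3
      (fun r (q : Int × List Int) => if q.1 == p.1 then r
        else if PySem.Int.floordiv q.1 9 == PySem.Int.floordiv p.1 9 then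
          PySem.Set.diff r ((pvMemoDict memo).getD q.1 []) else r)
      (fun r (q : Int × List Int) => if q.1 == p.1 then r
        else if PySem.Int.mod q.1 9 == PySem.Int.mod p.1 9 then
          PySem.Set.diff r ((pvMemoDict memo).getD q.1 []) else r)
      (fun r (q : Int × List Int) => if q.1 == p.1 then r
        else if (PySem.Int.floordiv (PySem.Int.floordiv p.1 9) 3 ==
                   PySem.Int.floordiv (PySem.Int.floordiv q.1 9) 3) &&
                (PySem.Int.floordiv (PySem.Int.mod p.1 9) 3 ==
                   PySem.Int.floordiv (PySem.Int.mod q.1 9) 3) then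
          PySem.Set.diff r ((pvMemoDict memo).getD q.1 []) else r)
      (pvMemoDict memo).items p.2 p.2 p.2]
    rw [inner_row (pvMemoDict memo) hnd hV p.1 p.2 hp,
        inner_col (pvMemoDict memo) hnd hV p.1 p.2 hp,
        inner_box (pvMemoDict memo) hnd hV p.1 p.2 hp]
    rfl
  rw [show (PySem.Set.empty : PySem.Set Int) = ([] : List Int) from rfl]
  rw [fold_steps _ _ _ (pvMemoDict memo).items (PySem.Dict.ofList puzzle) [] hK
    (by intro x hx; cases hx)]
  rfl
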